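-- pv_equiv track=rewrite | github.com/zuspec/zuspec-fe-pss | src/zuspec/fe/pss/__init__.py | _strip_activity_with_constraints
-- ===== SOURCE A (Python) =====
-- def _is_word_char(c: str) -> bool:
--     return c.isalnum() or c == '_'
--
-- def _scan_comment_or_string(text: str, i: int) -> int:
--     """Return end index after a comment or string at i, or -1 if not at one."""
--     n = len(text)
--     if text[i:i+2] == '//':
--         end = text.find('\n', i)
--         return n if end == -1 else end + 1
--     if text[i:i+2] == '/*':
--         end = text.find('*/', i + 2)
--         return n if end == -1 else end + 2
--     if text[i] == '"':
--         j = i + 1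
--         while j < n and text[j] != '"':
--             if text[j] == '\\':
--                 j += 1
--             j += 1
--         return min(j + 1, n)
--     return -1
--
-- def _find_matching_brace(text: str, start: int) -> int:
--     """Given text[start] == '{', return index of matching '}'. Returns -1 if not found."""
--     n = len(text)
--     depth = 0
--     i = start
--     while i < n:
--         end = _scan_comment_or_string(text, i)
--         if end != -1:
--             i = end
--             continue
--         if text[i] == '{':
--             depth += 1
--         elif text[i] == '}':
--             depth -= 1
--             if depth == 0:
--                 return i
--         i += 1
--     return -1
--
-- def _strip_activity_with_constraints(text: str) -> str:
--     """Remove 'with { ... }' inline constraints from PSS activity do-statements.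
--
--     The current pssparser grammar does not accept ``do action with { ... }``
--     inline constraint syntax in activity bodies.  This pass strips the
--     ``with { ... }`` portion so the parser can proceed; the inline constraints
--     are silently dropped (a known limitation of the pssparser-based front-end).
--     """
--     WS = ' \t\n\r'
--     result = []
--     i = 0
--     n = len(text)
--     while i < n:
--         end = _scan_comment_or_string(text, i)
--         if end != -1:
--             result.append(text[i:end])
--             i = end
--             continue
--
--         if (text[i:i+2] == 'do'
--                 and (i == 0 or not _is_word_char(text[i-1]))
--                 and (i+2 < n and not _is_word_char(text[i+2]))):
--             result.append('do')
--             i += 2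
--             # Copy whitespace and the traversal-target (handles qualified names: a::b::c)
--             while i < n and text[i] in WS:
--                 result.append(text[i]); i += 1
--             while i < n:
--                 if _is_word_char(text[i]):
--                     result.append(text[i]); i += 1
--                 elif text[i:i+2] == '::':
--                     result.append('::'); i += 2
--                 else:
--                     break
--             # Peek ahead for optional 'with { ... }'
--             j = i
--             while j < n and text[j] in WS:
--                 j += 1
--             if (text[j:j+4] == 'with'
--                     and (j+4 >= n or not _is_word_char(text[j+4]))):
--                 k = j + 4
--                 while k < n and text[k] in WS:
--                     k += 1
--                 if k < n and text[k] == '{':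
--                     end_brace = _find_matching_brace(text, k)
--                     if end_brace != -1:
--                         # Drop everything from current i up to end of '}'
--                         i = end_brace + 1
--                         continue
--             # No 'with' or couldn't strip — leave pointer at i (after identifier)
--             continue
--
--         result.append(text[i])
--         i += 1
--     return ''.join(result)
-- ===== SOURCE B (Python) =====
-- def _strip_activity_with_constraints(text: str) -> str:
--     """Two-phase rewrite: phase 1 scans with length-based helpers and records the
--     half-open spans (target end .. past matching '}') to delete; phase 2 rebuilds
--     the string by copying the gaps between the recorded spans."""
--     n = len(text)
--
--     def word(c):
--         return c.isalnum() or c == '_'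
--
--     def lit_len(i):
--         # length of the comment or string literal starting at i (0 if none)
--         if text.startswith('//', i):
--             e = text.find('\n', i)
--             return n - i if e < 0 else e + 1 - i
--         if text.startswith('/*', i):
--             e = text.find('*/', i + 2)
--             return n - i if e < 0 else e + 2 - i
--         if i < n and text[i] == '"':
--             j = i + 1
--             while j < n and text[j] != '"':
--                 j += 2 if text[j] == '\\' else 1
--             return min(j + 1, n) - i
--         return 0
--
--     def ws_len(i):
--         j = i
--         while j < n and text[j] in ' \t\n\r':
--             j += 1
--         return j - i
--
--     def tgt_len(i):
--         j = i
--         while j < n: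
--             if word(text[j]):
--                 j += 1
--             elif text.startswith('::', j):
--                 j += 2
--             else:
--                 break
--         return j - i
--
--     def brace_rel(i):
--         # relative index of the matching '}' for the '{' at i, or -1
--         d, j = 0, i
--         while j < n:
--             k = lit_len(j)
--             if k:
--                 j += k
--                 continue
--             if text[j] == '{':
--                 d += 1
--             elif text[j] == '}':
--                 d -= 1
--                 if d == 0:
--                     return j - i
--             j += 1
--         return -1
--
--     # phase 1: collect the spans to delete
--     spans = []
--     i = 0
--     while i < n:
--         k = lit_len(i)
--         if k:
--             i += k
--             continue
--         if (text.startswith('do', i) and (i == 0 or not word(text[i - 1]))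
--                 and i + 2 < n and not word(text[i + 2])):
--             p = i + 2 + ws_len(i + 2)
--             p += tgt_len(p)
--             j = p + ws_len(p)
--             if text.startswith('with', j) and (j + 4 >= n or not word(text[j + 4])):
--                 q = j + 4 + ws_len(j + 4)
--                 if text.startswith('{', q):
--                     r = brace_rel(q)
--                     if r >= 0:
--                         spans.append((p, q + r + 1))
--                         i = q + r + 1
--                         continue
--             i = p
--             continue
--         i += 1
--
--     # phase 2: copy the gaps between the spans
--     out, cur = [], 0
--     for s, e in spans:
--         out.append(text[cur:s])
--         cur = e
--     out.append(text[cur:])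
--     return ''.join(out)
-- ===== Notes on version B (the rewrite author's own statement) =====
-- stated objective: alternative
-- what changed: B is a two-phase decomposition: a scanning pass built from length-based suffix helpers (literal length, whitespace length, target length, relative matching-brace offset) that only records the half-open spans to delete, followed by a gap-copy pass that rebuilds the string from the span table; A is a single pass that appends every kept character to the result while it scans with index-returning helpers.
import Mathlib
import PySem

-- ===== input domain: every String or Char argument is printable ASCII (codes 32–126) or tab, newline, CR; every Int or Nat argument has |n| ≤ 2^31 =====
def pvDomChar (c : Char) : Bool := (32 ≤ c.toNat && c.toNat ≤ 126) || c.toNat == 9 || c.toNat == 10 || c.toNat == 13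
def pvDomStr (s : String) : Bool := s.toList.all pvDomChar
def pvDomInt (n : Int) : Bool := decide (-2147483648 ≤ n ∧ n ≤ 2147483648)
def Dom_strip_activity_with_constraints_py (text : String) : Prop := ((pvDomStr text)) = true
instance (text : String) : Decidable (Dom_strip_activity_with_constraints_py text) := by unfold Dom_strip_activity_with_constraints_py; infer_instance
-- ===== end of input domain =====

-- B is an alternative two-phase decomposition: phase 1 scans with length-based helpers
-- (length of literal / whitespace / target at a position, relative matching-brace offset)
-- and records only the half-open spans to delete; phase 2 rebuilds the string by copying
-- the gaps between the spans.  A instead appends every kept character as it scans.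

-- ===== PORT A =====
-- helpers: ports of _is_word_char, _scan_comment_or_string, _find_matching_brace

def pvIsWord (c : Char) : Bool := c.isAlphanum || c == '_'   -- c.isalnum() or c == '_' (exact on the ASCII domain)
def pvIsWS (c : Char) : Bool := c == ' ' || c == '\t' || c == '\n' || c == '\r'   -- c in ' \t\n\r'

-- first (relative) index where "*/" starts, as text.find('*/', …) finds it
def pvIdxPair : List Char → Option Nat
  | [] => none
  | a :: rest =>
    if a == '*' && rest.head? == some '/' then some 0 else (pvIdxPair rest).map (· + 1)

-- the j computed by the string-scanning while loop in _scan_comment_or_string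
def pvStrEnd (l : List Char) (j : Nat) : Nat :=
  if h : j < l.length ∧ l[j]? ≠ some '"' then
    if l[j]? = some '\\' then pvStrEnd l (j + 2) else pvStrEnd l (j + 1)
  else j
termination_by l.length - j
decreasing_by
  · exact Nat.sub_lt_sub_left h.1 (Nat.lt_add_of_pos_right Nat.zero_lt_two)
  · exact Nat.sub_lt_sub_left h.1 (Nat.lt_succ_self j)

-- _scan_comment_or_string; none = Python's -1
def pvScanCS (l : List Char) (i : Nat) : Option Nat :=
  if l[i]? == some '/' && l[i+1]? == some '/' then
    match (l.drop i).findIdx? (· == '\n') with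
    | none => some l.length
    | some d => some (i + d + 1)
  else if l[i]? == some '/' && l[i+1]? == some '*' then
    match pvIdxPair (l.drop (i+2)) with
    | none => some l.length
    | some d => some (i + 2 + d + 2)
  else if l[i]? == some '"' then
    some (min (pvStrEnd l (i+1) + 1) l.length)
  else none

theorem pvStrEnd_ge (l : List Char) (j : Nat) : j ≤ pvStrEnd l j := by
  fun_induction pvStrEnd l j with
  | case1 j h hbs ih => exact Nat.le_trans (Nat.le_add_right j 2) ih
  | case2 j h hbs ih => exact Nat.le_trans (Nat.le_succ j) ih
  | case3 j h => exact Nat.le_refl j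

theorem pvScanCS_gt {l : List Char} {i e : Nat} (h : pvScanCS l i = some e) : i < e := by
  unfold pvScanCS at h
  split_ifs at h with h1 h2 h3
  · have hi : i < l.length :=
      (List.getElem?_eq_some_iff.mp (by simpa using (Bool.and_eq_true_iff.mp h1).1)).1
    split at h
    · injection h with h'; omega
    · injection h with h'; omega
  · have hi : i < l.length :=
      (List.getElem?_eq_some_iff.mp (by simpa using (Bool.and_eq_true_iff.mp h2).1)).1
    split at h
    · injection h with h'; omega
    · injection h with h'; omega
  · have hi : i < l.length := (List.getElem?_eq_some_iff.mp (by simpa using h3)).1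
    have hs := pvStrEnd_ge l (i+1)
    injection h with h'
    omega

-- _find_matching_brace's while loop (depth is a Python int)
def pvFindMB (l : List Char) (i : Nat) (depth : Int) : Option Nat :=
  if hn : i < l.length then
    match hscan : pvScanCS l i with
    | some e => pvFindMB l e depth
    | none =>
      if l[i] == '{' then pvFindMB l (i+1) (depth+1)
      else if l[i] == '}' then
        if depth - 1 == 0 then some i else pvFindMB l (i+1) (depth-1)
      else pvFindMB l (i+1) depth
  else none
termination_by l.length - i
decreasing_by
  · exact Nat.sub_lt_sub_left hn (pvScanCS_gt hscan)
  all_goals exact Nat.sub_lt_sub_left hn (Nat.lt_succ_self i)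

theorem pvFindMB_ge' (l : List Char) (i : Nat) (d : Int) :
    ∀ e, pvFindMB l i d = some e → i ≤ e := by
  fun_induction pvFindMB l i d with
  | case1 i d hn e2 hscan ih =>
    exact fun e h => Nat.le_trans (Nat.le_of_lt (pvScanCS_gt hscan)) (ih e h)
  | case2 i d hn hscan hbr ih =>
    exact fun e h => Nat.le_trans (Nat.le_succ i) (ih e h)
  | case3 i d hn hscan hbr hbr2 hz =>
    intro e h; injection h with h'; exact Nat.le_of_eq h'
  | case4 i d hn hscan hbr hbr2 hz ih =>
    exact fun e h => Nat.le_trans (Nat.le_succ i) (ih e h)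
  | case5 i d hn hscan hbr hbr2 ih =>
    exact fun e h => Nat.le_trans (Nat.le_succ i) (ih e h)
  | case6 i d hn =>
    intro e h; exact absurd h (by simp)

theorem pvFindMB_ge {l : List Char} {i e : Nat} {d : Int} (h : pvFindMB l i d = some e) : i ≤ e :=
  pvFindMB_ge' l i d e h

-- 'while i < n and text[i] in WS' — returns the new index (used for j, k)
def pvSkipWS (l : List Char) (i : Nat) : Nat :=
  if h : i < l.length then
    if pvIsWS l[i] then pvSkipWS l (i+1) else i
  else i
termination_by l.length - i
decreasing_by exact Nat.sub_lt_sub_left h (Nat.lt_succ_self i)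

theorem pvSkipWS_ge (l : List Char) (i : Nat) : i ≤ pvSkipWS l i := by
  fun_induction pvSkipWS l i with
  | case1 i h hws ih => exact Nat.le_trans (Nat.le_succ i) ih
  | case2 i h hws => exact Nat.le_refl i
  | case3 i h => exact Nat.le_refl i

-- A-side copy loops (append each copied character; return the copied chars and the new index)
def pvCopyWS (l : List Char) (i : Nat) : List Char × Nat :=
  if h : i < l.length then
    if pvIsWS l[i] then (l[i] :: (pvCopyWS l (i+1)).1, (pvCopyWS l (i+1)).2) else ([], i)
  else ([], i)
termination_by l.length - i
decreasing_by all_goals exact Nat.sub_lt_sub_left h (Nat.lt_succ_self i)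

def pvCopyTarget (l : List Char) (i : Nat) : List Char × Nat :=
  if h : i < l.length then
    if pvIsWord l[i] then (l[i] :: (pvCopyTarget l (i+1)).1, (pvCopyTarget l (i+1)).2)
    else if l[i] == ':' && l[i+1]? == some ':' then
      (':' :: ':' :: (pvCopyTarget l (i+2)).1, (pvCopyTarget l (i+2)).2)
    else ([], i)
  else ([], i)
termination_by l.length - i
decreasing_by
  all_goals first
    | exact Nat.sub_lt_sub_left h (Nat.lt_succ_self i)
    | exact Nat.sub_lt_sub_left h (Nat.lt_add_of_pos_right Nat.zero_lt_two)

theorem pvCopyWS_snd_ge (l : List Char) (i : Nat) : i ≤ (pvCopyWS l i).2 := by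
  fun_induction pvCopyWS l i with
  | case1 i h hws ih => exact Nat.le_trans (Nat.le_succ i) ih
  | case2 i h hws => exact Nat.le_refl i
  | case3 i h => exact Nat.le_refl i

theorem pvCopyTarget_snd_ge (l : List Char) (i : Nat) : i ≤ (pvCopyTarget l i).2 := by
  fun_induction pvCopyTarget l i with
  | case1 i h hw ih => exact Nat.le_trans (Nat.le_succ i) ih
  | case2 i h hw hc ih => exact Nat.le_trans (Nat.le_add_right i 2) ih
  | case3 i h hw hc => exact Nat.le_refl i
  | case4 i h => exact Nat.le_refl i

-- the 'do'-token condition (word boundaries; note A's strict i+2 < n)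
def pvDoCond (l : List Char) (i : Nat) : Bool :=
  l[i]? == some 'd' && l[i+1]? == some 'o' &&
  (i == 0 || !(match l[i-1]? with | some c => pvIsWord c | none => false)) &&
  (match l[i+2]? with | some c => !pvIsWord c | none => false)

-- text[j:j+4] == 'with' and (j+4 >= n or not word char)
def pvWithCond (l : List Char) (j : Nat) : Bool :=
  l[j]? == some 'w' && l[j+1]? == some 'i' && l[j+2]? == some 't' && l[j+3]? == some 'h' &&
  (match l[j+4]? with | some c => !pvIsWord c | none => true)

-- text[a:b] for 0 ≤ a ≤ b
def pvSeg (l : List Char) (a b : Nat) : List Char := (l.drop a).take (b - a)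

def pvLoopA (l : List Char) (i : Nat) : List Char :=
  if hn : i < l.length then
    match hscan : pvScanCS l i with
    | some e => pvSeg l i e ++ pvLoopA l e
    | none =>
      if pvDoCond l i then
        -- w := pvCopyWS l (i+2); t := pvCopyTarget l w.2; j := pvSkipWS l t.2; k := pvSkipWS l (j+4)
        if pvWithCond l (pvSkipWS l (pvCopyTarget l (pvCopyWS l (i+2)).2).2) then
          if l[pvSkipWS l (pvSkipWS l (pvCopyTarget l (pvCopyWS l (i+2)).2).2 + 4)]? == some '{' then
            match hmb : pvFindMB l (pvSkipWS l (pvSkipWS l (pvCopyTarget l (pvCopyWS l (i+2)).2).2 + 4)) 0 with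
            | some eb =>
              'd' :: 'o' :: ((pvCopyWS l (i+2)).1 ++ (pvCopyTarget l (pvCopyWS l (i+2)).2).1 ++ pvLoopA l (eb+1))
            | none =>
              'd' :: 'o' :: ((pvCopyWS l (i+2)).1 ++ (pvCopyTarget l (pvCopyWS l (i+2)).2).1 ++
                pvLoopA l (pvCopyTarget l (pvCopyWS l (i+2)).2).2)
          else
            'd' :: 'o' :: ((pvCopyWS l (i+2)).1 ++ (pvCopyTarget l (pvCopyWS l (i+2)).2).1 ++
              pvLoopA l (pvCopyTarget l (pvCopyWS l (i+2)).2).2)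
        else
          'd' :: 'o' :: ((pvCopyWS l (i+2)).1 ++ (pvCopyTarget l (pvCopyWS l (i+2)).2).1 ++
            pvLoopA l (pvCopyTarget l (pvCopyWS l (i+2)).2).2)
      else l.getD i ' ' :: pvLoopA l (i+1)
  else []
termination_by l.length - i
decreasing_by
  · exact Nat.sub_lt_sub_left hn (pvScanCS_gt hscan)
  · exact Nat.sub_lt_sub_left hn (Nat.lt_succ_of_le (Nat.le_trans (Nat.le_add_right i 2)
      (Nat.le_trans (pvCopyWS_snd_ge l (i+2)) (Nat.le_trans (pvCopyTarget_snd_ge l _)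
        (Nat.le_trans (pvSkipWS_ge l _) (Nat.le_trans (Nat.le_add_right _ 4)
          (Nat.le_trans (pvSkipWS_ge l _) (pvFindMB_ge hmb))))))))
  · exact Nat.sub_lt_sub_left hn (Nat.lt_of_lt_of_le (Nat.lt_add_of_pos_right Nat.zero_lt_two)
      (Nat.le_trans (pvCopyWS_snd_ge l (i+2)) (pvCopyTarget_snd_ge l _)))
  · exact Nat.sub_lt_sub_left hn (Nat.lt_of_lt_of_le (Nat.lt_add_of_pos_right Nat.zero_lt_two)
      (Nat.le_trans (pvCopyWS_snd_ge l (i+2)) (pvCopyTarget_snd_ge l _)))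
  · exact Nat.sub_lt_sub_left hn (Nat.lt_of_lt_of_le (Nat.lt_add_of_pos_right Nat.zero_lt_two)
      (Nat.le_trans (pvCopyWS_snd_ge l (i+2)) (pvCopyTarget_snd_ge l _)))
  · exact Nat.sub_lt_sub_left hn (Nat.lt_succ_self i)

def strip_activity_with_constraints_py (text : String) : String :=
  String.ofList (pvLoopA text.toList 0)

-- ===== PORT B =====
-- B's helpers all work on the SUFFIX starting at the current position and return
-- LENGTHS / relative offsets (the natural Lean rendering of Source B's length helpers,
-- which take an index i and inspect text from i on).

def bWord (c : Char) : Bool := c.isAlphanum || c == '_'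
def bWs (c : Char) : Bool := c == ' ' || c == '\t' || c == '\n' || c == '\r'

-- relative position of "*/" in a suffix (text.find('*/', …))
def bStarPos : List Char → Option Nat
  | '*' :: '/' :: _ => some 0
  | _ :: t => (bStarPos t).map (· + 1)
  | [] => none

-- chars consumed after the opening quote of a string literal (incl. closing quote, capped)
def bStrLen : List Char → Nat
  | [] => 0
  | '"' :: _ => 1
  | '\\' :: _ :: t => 2 + bStrLen t
  | '\\' :: [] => 1
  | _ :: t => 1 + bStrLen t

-- lit_len: length of the comment or string literal starting here (0 if none)
def bLitLen : List Char → Nat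
  | '/' :: '/' :: t =>
    (match t.findIdx? (· == '\n') with
     | none => t.length + 2
     | some d => d + 3)
  | '/' :: '*' :: t =>
    (match bStarPos t with
     | none => t.length + 2
     | some d => d + 4)
  | '"' :: t => 1 + bStrLen t
  | _ => 0

-- ws_len
def bWsLen : List Char → Nat
  | c :: t => if bWs c then 1 + bWsLen t else 0
  | [] => 0

-- tgt_len: length of the ::-qualified traversal target starting here
def bTgtLen : List Char → Nat
  | [] => 0
  | [c] => if bWord c then 1 else 0
  | c :: d :: t =>
    if bWord c then 1 + bTgtLen (d :: t)
    else if c == ':' && d == ':' then 2 + bTgtLen t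
    else 0

-- brace_rel: relative index of the matching '}' for the '{' at the head (none = -1)
def bMb : List Char → Int → Option Nat
  | [], _ => none
  | c :: t, d =>
    if hk : 0 < bLitLen (c :: t) then
      (bMb ((c :: t).drop (bLitLen (c :: t))) d).map (· + bLitLen (c :: t))
    else if c == '{' then (bMb t (d + 1)).map (· + 1)
    else if c == '}' then
      if d - 1 == 0 then some 0 else (bMb t (d - 1)).map (· + 1)
    else (bMb t d).map (· + 1)
termination_by s _ => s.length
decreasing_by
  · simp only [List.length_drop, List.length_cons]; omega
  all_goals simp

-- text.startswith('do', i) with Source B's boundary checks; 'prev' carries the char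
-- before the suffix (Source B reads text[i-1]; a suffix cannot index backwards) — exact
def bDoHere (prev : Option Char) (s : List Char) : Bool :=
  s[0]? == some 'd' && s[1]? == some 'o' &&
  (match prev with | none => true | some q => !bWord q) &&
  (match s[2]? with | some c => !bWord c | none => false)

-- text.startswith('with', j) and (j+4 >= n or not word)
def bWithAt (s : List Char) : Bool :=
  s[0]? == some 'w' && s[1]? == some 'i' && s[2]? == some 't' && s[3]? == some 'h' &&
  (match s[4]? with | some c => !bWord c | none => true)

-- phase 1: collect the spans to delete; off = absolute offset of suffix s
def bScan (prev : Option Char) (off : Nat) (s : List Char) : List (Nat × Nat) :=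
  if hs : s = [] then []
  else if hk : 0 < bLitLen s then
    bScan s[bLitLen s - 1]? (off + bLitLen s) (s.drop (bLitLen s))
  else if bDoHere prev s then
    let a := bWsLen (s.drop 2)
    let b := bTgtLen (s.drop (2 + a))
    let p := 2 + a + b
    let w := bWsLen (s.drop p)
    if bWithAt (s.drop (p + w)) then
      let u := bWsLen (s.drop (p + w + 4))
      let q := p + w + 4 + u
      if (s.drop q).head? == some '{' then
        match bMb (s.drop q) 0 with
        | some r => (off + p, off + q + r + 1) :: bScan s[q + r]? (off + q + r + 1) (s.drop (q + r + 1))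
        | none => bScan s[p - 1]? (off + p) (s.drop p)
      else bScan s[p - 1]? (off + p) (s.drop p)
    else bScan s[p - 1]? (off + p) (s.drop p)
  else bScan s[0]? (off + 1) (s.drop 1)
termination_by s.length
decreasing_by
  all_goals
    have h0 : 0 < s.length := List.length_pos_of_ne_nil hs
  all_goals simp only [List.length_drop]; omega

-- phase 2: copy the gaps between the spans
def bRender (l : List Char) (cur : Nat) : List (Nat × Nat) → List Char
  | [] => l.drop cur
  | (s, e) :: rest => (l.drop cur).take (s - cur) ++ bRender l e rest

def strip_activity_with_constraints_py_alt (text : String) : String :=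
  String.ofList (bRender text.toList 0 (bScan none 0 text.toList))

-- ===== PRECONDITION & SPEC =====
def Spec_strip_activity_with_constraints_py (text : String) (out : String) : Prop := out = strip_activity_with_constraints_py_alt text
instance (text : String) (out : String) : Decidable (Spec_strip_activity_with_constraints_py text out) := by unfold Spec_strip_activity_with_constraints_py; infer_instance

-- ===== CLAIM (what is proved, stated in full; the proofs are below) =====
def Claim_equal_strip_activity_with_constraints_py : Prop := ∀ (text : String), Dom_strip_activity_with_constraints_py text → Spec_strip_activity_with_constraints_py text (strip_activity_with_constraints_py text)

-- ===== LEMMAS AND PROOFS =====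

-- proof-layer intermediate: A's scan positions expressed as index skips
def pvSkipTarget (l : List Char) (i : Nat) : Nat :=
  if h : i < l.length then
    if pvIsWord l[i] then pvSkipTarget l (i+1)
    else if l[i] == ':' && l[i+1]? == some ':' then pvSkipTarget l (i+2)
    else i
  else i
termination_by l.length - i
decreasing_by
  · exact Nat.sub_lt_sub_left h (Nat.lt_succ_self i)
  · exact Nat.sub_lt_sub_left h (Nat.lt_add_of_pos_right Nat.zero_lt_two)

theorem pvSkipTarget_ge (l : List Char) (i : Nat) : i ≤ pvSkipTarget l i := by
  fun_induction pvSkipTarget l i with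
  | case1 i h hw ih => exact Nat.le_trans (Nat.le_succ i) ih
  | case2 i h hw hc ih => exact Nat.le_trans (Nat.le_add_right i 2) ih
  | case3 i h hw hc => exact Nat.le_refl i
  | case4 i h => exact Nat.le_refl i

-- proof-layer intermediate: index-based span scanner (bridges A's loop and B's bScan)
def pvScanB (l : List Char) (i : Nat) : List (Nat × Nat) :=
  if hn : i < l.length then
    match hscan : pvScanCS l i with
    | some e => pvScanB l e
    | none =>
      if pvDoCond l i then
        if pvWithCond l (pvSkipWS l (pvSkipTarget l (pvSkipWS l (i+2)))) then
          if l[pvSkipWS l (pvSkipWS l (pvSkipTarget l (pvSkipWS l (i+2))) + 4)]? == some '{' then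
            match hmb : pvFindMB l (pvSkipWS l (pvSkipWS l (pvSkipTarget l (pvSkipWS l (i+2))) + 4)) 0 with
            | some eb => (pvSkipTarget l (pvSkipWS l (i+2)), eb+1) :: pvScanB l (eb+1)
            | none => pvScanB l (pvSkipTarget l (pvSkipWS l (i+2)))
          else pvScanB l (pvSkipTarget l (pvSkipWS l (i+2)))
        else pvScanB l (pvSkipTarget l (pvSkipWS l (i+2)))
      else pvScanB l (i+1)
  else []
termination_by l.length - i
decreasing_by
  · exact Nat.sub_lt_sub_left hn (pvScanCS_gt hscan)
  · exact Nat.sub_lt_sub_left hn (Nat.lt_succ_of_le (Nat.le_trans (Nat.le_add_right i 2)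
      (Nat.le_trans (pvSkipWS_ge l (i+2)) (Nat.le_trans (pvSkipTarget_ge l _)
        (Nat.le_trans (pvSkipWS_ge l _) (Nat.le_trans (Nat.le_add_right _ 4)
          (Nat.le_trans (pvSkipWS_ge l _) (pvFindMB_ge hmb))))))))
  · exact Nat.sub_lt_sub_left hn (Nat.lt_of_lt_of_le (Nat.lt_add_of_pos_right Nat.zero_lt_two)
      (Nat.le_trans (pvSkipWS_ge l (i+2)) (pvSkipTarget_ge l _)))
  · exact Nat.sub_lt_sub_left hn (Nat.lt_of_lt_of_le (Nat.lt_add_of_pos_right Nat.zero_lt_two)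
      (Nat.le_trans (pvSkipWS_ge l (i+2)) (pvSkipTarget_ge l _)))
  · exact Nat.sub_lt_sub_left hn (Nat.lt_of_lt_of_le (Nat.lt_add_of_pos_right Nat.zero_lt_two)
      (Nat.le_trans (pvSkipWS_ge l (i+2)) (pvSkipTarget_ge l _)))
  · exact Nat.sub_lt_sub_left hn (Nat.lt_succ_self i)

def pvRender (l : List Char) (c : Nat) : List (Nat × Nat) → List Char
  | [] => l.drop c
  | (s, e) :: rest => pvSeg l c s ++ pvRender l e rest

theorem pvSeg_append {l : List Char} {a b c : Nat} (h1 : a ≤ b) (h2 : b ≤ c) :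
    pvSeg l a b ++ pvSeg l b c = pvSeg l a c := by
  unfold pvSeg
  have hd : List.drop b l = List.drop (b - a) (List.drop a l) := by
    rw [List.drop_drop]; congr 1; omega
  rw [hd, ← List.take_add]
  congr 1
  omega

theorem pvSeg_drop {l : List Char} {a b : Nat} (h : a ≤ b) :
    pvSeg l a b ++ l.drop b = l.drop a := by
  unfold pvSeg
  have hb : l.drop b = (l.drop a).drop (b - a) := by rw [List.drop_drop]; congr 1; omega
  rw [hb, List.take_append_drop]

theorem pvSeg_cons {l : List Char} {a b : Nat} {ch : Char} (h : l[a]? = some ch) (hab : a < b) :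
    pvSeg l a b = ch :: pvSeg l (a+1) b := by
  unfold pvSeg
  obtain ⟨ha, hc⟩ := List.getElem?_eq_some_iff.mp h
  rw [List.drop_eq_getElem_cons ha, hc]
  have : b - a = (b - (a+1)) + 1 := by omega
  rw [this, List.take_succ_cons]

theorem pvRender_split {l : List Char} {a b : Nat} {sp : List (Nat × Nat)}
    (hab : a ≤ b) (hge : ∀ s e, (s, e) ∈ sp → b ≤ s) :
    pvRender l a sp = pvSeg l a b ++ pvRender l b sp := by
  cases sp with
  | nil => simp [pvRender, pvSeg_drop hab]
  | cons hd rest =>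
    obtain ⟨s, e⟩ := hd
    have hbs : b ≤ s := hge s e (by simp)
    simp only [pvRender]
    rw [← pvSeg_append hab hbs, List.append_assoc]

theorem pvScanB_stop {l : List Char} {i : Nat} (hn : ¬ i < l.length) : pvScanB l i = [] := by
  rw [pvScanB.eq_def, dif_neg hn]

theorem pvScanB_cs {l : List Char} {i e : Nat} (hn : i < l.length)
    (hscan : pvScanCS l i = some e) : pvScanB l i = pvScanB l e := by
  rw [pvScanB.eq_def, dif_pos hn]
  split
  · simp_all
  · simp_all

theorem pvScanB_char {l : List Char} {i : Nat} (hn : i < l.length)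
    (hscan : pvScanCS l i = none) (hdo : pvDoCond l i = false) :
    pvScanB l i = pvScanB l (i+1) := by
  rw [pvScanB.eq_def, dif_pos hn]
  split
  · simp_all
  · simp [hdo]

theorem pvScanB_strip {l : List Char} {i eb : Nat} (hn : i < l.length)
    (hscan : pvScanCS l i = none) (hdo : pvDoCond l i = true)
    (hw : pvWithCond l (pvSkipWS l (pvSkipTarget l (pvSkipWS l (i+2)))) = true)
    (hbr : l[pvSkipWS l (pvSkipWS l (pvSkipTarget l (pvSkipWS l (i+2))) + 4)]? = some '{')
    (hmb : pvFindMB l (pvSkipWS l (pvSkipWS l (pvSkipTarget l (pvSkipWS l (i+2))) + 4)) 0 = some eb) :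
    pvScanB l i = (pvSkipTarget l (pvSkipWS l (i+2)), eb+1) :: pvScanB l (eb+1) := by
  rw [pvScanB.eq_def, dif_pos hn]
  split
  · simp_all
  · simp only [hdo, if_true, hw, hbr]
    rw [hmb]
    simp

theorem pvScanB_nostrip1 {l : List Char} {i : Nat} (hn : i < l.length)
    (hscan : pvScanCS l i = none) (hdo : pvDoCond l i = true)
    (hw : pvWithCond l (pvSkipWS l (pvSkipTarget l (pvSkipWS l (i+2)))) = false) :
    pvScanB l i = pvScanB l (pvSkipTarget l (pvSkipWS l (i+2))) := by
  rw [pvScanB.eq_def, dif_pos hn]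
  split
  · simp_all
  · simp [hdo, hw]

theorem pvScanB_nostrip2 {l : List Char} {i : Nat} (hn : i < l.length)
    (hscan : pvScanCS l i = none) (hdo : pvDoCond l i = true)
    (hw : pvWithCond l (pvSkipWS l (pvSkipTarget l (pvSkipWS l (i+2)))) = true)
    (hbr : ¬ (l[pvSkipWS l (pvSkipWS l (pvSkipTarget l (pvSkipWS l (i+2))) + 4)]? == some '{') = true) :
    pvScanB l i = pvScanB l (pvSkipTarget l (pvSkipWS l (i+2))) := by
  rw [pvScanB.eq_def, dif_pos hn]
  split
  · simp_all
  · simp only [hdo, if_true, hw]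
    simp only [Bool.not_eq_true] at hbr
    simp [hbr]

theorem pvScanB_nostrip3 {l : List Char} {i : Nat} (hn : i < l.length)
    (hscan : pvScanCS l i = none) (hdo : pvDoCond l i = true)
    (hw : pvWithCond l (pvSkipWS l (pvSkipTarget l (pvSkipWS l (i+2)))) = true)
    (hbr : (l[pvSkipWS l (pvSkipWS l (pvSkipTarget l (pvSkipWS l (i+2))) + 4)]? == some '{') = true)
    (hmb : pvFindMB l (pvSkipWS l (pvSkipWS l (pvSkipTarget l (pvSkipWS l (i+2))) + 4)) 0 = none) :
    pvScanB l i = pvScanB l (pvSkipTarget l (pvSkipWS l (i+2))) := by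
  rw [pvScanB.eq_def, dif_pos hn]
  split
  · simp_all
  · simp only [hdo, if_true, hw, hbr]
    rw [hmb]

theorem pvScanB_ge (l : List Char) (i : Nat) :
    ∀ s e, (s, e) ∈ pvScanB l i → i ≤ s := by
  fun_induction pvScanB l i with
  | case1 i hn e hscan ih =>
    intro s e' hm
    have := pvScanCS_gt hscan
    have := ih s e' hm
    omega
  | case2 i hn hscan hdo hw hbr eb hmb ih =>
    intro s e' hm
    have h1 := pvSkipWS_ge l (i+2)
    have h2 := pvSkipTarget_ge l (pvSkipWS l (i+2))
    rcases List.mem_cons.mp hm with h | h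
    · have hs : s = pvSkipTarget l (pvSkipWS l (i+2)) := (Prod.mk.injEq _ _ _ _ ▸ h).1
      omega
    · have h5 : pvSkipWS l (pvSkipWS l (pvSkipTarget l (pvSkipWS l (i+2))) + 4) ≤ eb :=
        pvFindMB_ge hmb
      have h3 := pvSkipWS_ge l (pvSkipTarget l (pvSkipWS l (i+2)))
      have h4 := pvSkipWS_ge l (pvSkipWS l (pvSkipTarget l (pvSkipWS l (i+2))) + 4)
      have := ih s e' h
      omega
  | case3 i hn hscan hdo hw hbr hmb ih =>
    intro s e' hm
    have h1 := pvSkipWS_ge l (i+2)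
    have h2 := pvSkipTarget_ge l (pvSkipWS l (i+2))
    have := ih s e' hm
    omega
  | case4 i hn hscan hdo hw hbr ih =>
    intro s e' hm
    have h1 := pvSkipWS_ge l (i+2)
    have h2 := pvSkipTarget_ge l (pvSkipWS l (i+2))
    have := ih s e' hm
    omega
  | case5 i hn hscan hdo hw ih =>
    intro s e' hm
    have h1 := pvSkipWS_ge l (i+2)
    have h2 := pvSkipTarget_ge l (pvSkipWS l (i+2))
    have := ih s e' hm
    omega
  | case6 i hn hscan hdo ih =>
    intro s e' hm
    have := ih s e' hm
    omega
  | case7 i hn =>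
    intro s e' hm
    simp at hm

theorem pvCopyWS_eq (l : List Char) (i : Nat) :
    pvCopyWS l i = (pvSeg l i (pvSkipWS l i), pvSkipWS l i) := by
  fun_induction pvCopyWS l i with
  | case1 i hlt hws ih =>
    have hget : l[i]? = some l[i] := List.getElem?_eq_getElem hlt
    have hskip : pvSkipWS l i = pvSkipWS l (i+1) := by
      conv_lhs => rw [pvSkipWS.eq_def]
      rw [dif_pos hlt, if_pos hws]
    have hge := pvSkipWS_ge l (i+1)
    rw [ih, hskip, pvSeg_cons hget (by omega)]
  | case2 i hlt hws =>
    have hskip : pvSkipWS l i = i := by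
      conv_lhs => rw [pvSkipWS.eq_def]
      rw [dif_pos hlt, if_neg hws]
    simp [hskip, pvSeg]
  | case3 i hlt =>
    have hskip : pvSkipWS l i = i := by
      conv_lhs => rw [pvSkipWS.eq_def]
      rw [dif_neg hlt]
    simp [hskip, pvSeg]

theorem pvCopyTarget_eq (l : List Char) (i : Nat) :
    pvCopyTarget l i = (pvSeg l i (pvSkipTarget l i), pvSkipTarget l i) := by
  fun_induction pvCopyTarget l i with
  | case1 i hlt hword ih =>
    have hget : l[i]? = some l[i] := List.getElem?_eq_getElem hlt
    have hskip : pvSkipTarget l i = pvSkipTarget l (i+1) := by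
      conv_lhs => rw [pvSkipTarget.eq_def]
      rw [dif_pos hlt, if_pos hword]
    have hge := pvSkipTarget_ge l (i+1)
    rw [ih, hskip, pvSeg_cons hget (by omega)]
  | case2 i hlt hword hcol ih =>
    have hc : l[i] = ':' := by
      have := (Bool.and_eq_true_iff.mp hcol).1; simpa using this
    have hget : l[i]? = some ':' := by
      rw [← hc]; exact List.getElem?_eq_getElem hlt
    have hget2 : l[i+1]? = some ':' := by
      have := (Bool.and_eq_true_iff.mp hcol).2; simpa using this
    have hskip : pvSkipTarget l i = pvSkipTarget l (i+2) := by
      conv_lhs => rw [pvSkipTarget.eq_def]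
      rw [dif_pos hlt, if_neg hword, if_pos hcol]
    have hge := pvSkipTarget_ge l (i+2)
    rw [ih, hskip, pvSeg_cons hget (by omega), pvSeg_cons hget2 (by omega)]
  | case3 i hlt hword hcol =>
    have hskip : pvSkipTarget l i = i := by
      conv_lhs => rw [pvSkipTarget.eq_def]
      rw [dif_pos hlt, if_neg hword, if_neg hcol]
    simp [hskip, pvSeg]
  | case4 i hlt =>
    have hskip : pvSkipTarget l i = i := by
      conv_lhs => rw [pvSkipTarget.eq_def]
      rw [dif_neg hlt]
    simp [hskip, pvSeg]

theorem pvSeg_do {l : List Char} {i : Nat} (hd : l[i]? = some 'd') (ho : l[i+1]? = some 'o') :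
    pvSeg l i (i+2) = ['d', 'o'] := by
  rw [pvSeg_cons hd (by omega), pvSeg_cons ho (by omega)]
  simp [pvSeg]

theorem pvDoCond_chars {l : List Char} {i : Nat} (hdo : pvDoCond l i = true) :
    l[i]? = some 'd' ∧ l[i+1]? = some 'o' := by
  unfold pvDoCond at hdo
  simp only [Bool.and_eq_true, beq_iff_eq] at hdo
  tauto

-- A's do-branch output equals text[i:p] followed by the continuation
theorem pvDoPrefix {l : List Char} {i : Nat} (hdo : pvDoCond l i = true) (X : List Char) :
    'd' :: 'o' :: ((pvCopyWS l (i+2)).1 ++ (pvCopyTarget l (pvCopyWS l (i+2)).2).1 ++ X)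
      = pvSeg l i (pvSkipTarget l (pvSkipWS l (i+2))) ++ X := by
  obtain ⟨hd, ho⟩ := pvDoCond_chars hdo
  have h1 := pvSkipWS_ge l (i+2)
  have h2 := pvSkipTarget_ge l (pvSkipWS l (i+2))
  rw [pvCopyWS_eq, pvCopyTarget_eq]
  have e1 : pvSeg l i (pvSkipTarget l (pvSkipWS l (i+2)))
      = pvSeg l i (i+2) ++ (pvSeg l (i+2) (pvSkipWS l (i+2)) ++ pvSeg l (pvSkipWS l (i+2)) (pvSkipTarget l (pvSkipWS l (i+2)))) := by
    rw [pvSeg_append h1 h2, pvSeg_append (by omega) (by omega)]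
  rw [e1, pvSeg_do hd ho]
  simp

theorem pvLoopA_eq_render (l : List Char) (i : Nat) :
    pvLoopA l i = pvRender l i (pvScanB l i) := by
  fun_induction pvLoopA l i with
  | case1 i hn e hscan ih =>
    rw [pvScanB_cs hn hscan,
        pvRender_split (Nat.le_of_lt (pvScanCS_gt hscan)) (pvScanB_ge l e), ih]
  | case2 i hn hscan hdo hw hbr eb hmb ih =>
    have ht : (pvCopyTarget l (pvCopyWS l (i+2)).2).2 = pvSkipTarget l (pvSkipWS l (i+2)) := by
      simp [pvCopyWS_eq, pvCopyTarget_eq]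
    rw [ht] at hw hbr hmb
    rw [pvScanB_strip hn hscan hdo hw (by simpa using hbr) hmb]
    simp only [pvRender]
    rw [ih, pvDoPrefix hdo]
  | case3 i hn hscan hdo hw hbr hmb ih =>
    have ht : (pvCopyTarget l (pvCopyWS l (i+2)).2).2 = pvSkipTarget l (pvSkipWS l (i+2)) := by
      simp [pvCopyWS_eq, pvCopyTarget_eq]
    rw [ht] at hw hbr hmb ih
    have h1 := pvSkipWS_ge l (i+2)
    have h2 := pvSkipTarget_ge l (pvSkipWS l (i+2))
    rw [pvScanB_nostrip3 hn hscan hdo hw hbr hmb,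
        pvRender_split (by omega : i ≤ pvSkipTarget l (pvSkipWS l (i+2)))
          (pvScanB_ge l (pvSkipTarget l (pvSkipWS l (i+2)))),
        ht, ih]
    exact pvDoPrefix hdo _
  | case4 i hn hscan hdo hw hbr ih =>
    have ht : (pvCopyTarget l (pvCopyWS l (i+2)).2).2 = pvSkipTarget l (pvSkipWS l (i+2)) := by
      simp [pvCopyWS_eq, pvCopyTarget_eq]
    rw [ht] at hw hbr ih
    have h1 := pvSkipWS_ge l (i+2)
    have h2 := pvSkipTarget_ge l (pvSkipWS l (i+2))
    rw [pvScanB_nostrip2 hn hscan hdo hw hbr,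
        pvRender_split (by omega : i ≤ pvSkipTarget l (pvSkipWS l (i+2)))
          (pvScanB_ge l (pvSkipTarget l (pvSkipWS l (i+2)))),
        ht, ih]
    exact pvDoPrefix hdo _
  | case5 i hn hscan hdo hw ih =>
    have ht : (pvCopyTarget l (pvCopyWS l (i+2)).2).2 = pvSkipTarget l (pvSkipWS l (i+2)) := by
      simp [pvCopyWS_eq, pvCopyTarget_eq]
    rw [ht] at hw ih
    have h1 := pvSkipWS_ge l (i+2)
    have h2 := pvSkipTarget_ge l (pvSkipWS l (i+2))
    rw [pvScanB_nostrip1 hn hscan hdo (by simpa using hw),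
        pvRender_split (by omega : i ≤ pvSkipTarget l (pvSkipWS l (i+2)))
          (pvScanB_ge l (pvSkipTarget l (pvSkipWS l (i+2)))),
        ht, ih]
    exact pvDoPrefix hdo _
  | case6 i hn hscan hdo ih =>
    have hget : l[i]? = some l[i] := List.getElem?_eq_getElem hn
    have hdo' : pvDoCond l i = false := by simpa using hdo
    rw [pvScanB_char hn hscan hdo',
        pvRender_split (by omega : i ≤ i+1) (pvScanB_ge l (i+1)), ih,
        pvSeg_cons hget (by omega)]
    simp [pvSeg, List.getD, hget]
  | case7 i hn =>
    rw [pvScanB_stop hn]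
    simp [pvRender, List.drop_eq_nil_of_le (by omega : l.length ≤ i)]

-- ===== bridge: B's suffix/length helpers agree with A's index skips =====

theorem bRender_eq_pvRender (l : List Char) (c : Nat) (sp : List (Nat × Nat)) :
    bRender l c sp = pvRender l c sp := by
  induction sp generalizing c with
  | nil => rfl
  | cons hd rest ih => obtain ⟨s, e⟩ := hd; simp [bRender, pvRender, pvSeg, ih]

theorem bStarPos_eq (t : List Char) : bStarPos t = pvIdxPair t := by
  fun_induction bStarPos t with
  | case1 => simp [pvIdxPair]
  | case2 a t h ih =>
    have hc : (a == '*' && t.head? == some '/') = false := by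
      by_cases ha : a = '*'
      · subst ha
        cases t with
        | nil => simp
        | cons b tb =>
          by_cases hb : b = '/'
          · exact (h tb rfl (by rw [hb])).elim
          · simp [hb]
      · simp [ha]
    simp [pvIdxPair, hc, ih]
  | case3 => rfl

theorem bStrLen_cons {c : Char} {t : List Char} (h1 : c ≠ '"') (h2 : c ≠ '\\') :
    bStrLen (c :: t) = 1 + bStrLen t := by
  rw [bStrLen.eq_def]
  split <;> simp_all

theorem bStrLen_bridge (l : List Char) (j : Nat) :
    j ≤ l.length → min (pvStrEnd l j + 1) l.length = j + bStrLen (l.drop j) := by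
  fun_induction pvStrEnd l j with
  | case1 j h hbs ih =>
    intro hj
    have hlt : j < l.length := h.1
    have hd : l.drop j = l[j] :: l.drop (j+1) := List.drop_eq_getElem_cons hlt
    have hbs' : l[j] = '\\' := by
      have := List.getElem?_eq_getElem hlt
      rw [this] at hbs; injection hbs
    by_cases h2 : j + 1 < l.length
    · have hd2 : l.drop (j+1) = l[j+1] :: l.drop (j+2) := List.drop_eq_getElem_cons h2
      rw [hd, hbs', hd2]
      have := ih (by omega)
      simp only [bStrLen]
      omega
    · have hd2 : l.drop (j+1) = [] := List.drop_eq_nil_of_le (by omega)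
      rw [hd, hbs', hd2]
      have hstop : pvStrEnd l (j+2) = j+2 := by
        rw [pvStrEnd.eq_def, dif_neg]
        intro hc; omega
      rw [hstop]
      simp only [bStrLen]
      omega
  | case2 j h hbs ih =>
    intro hj
    have hlt : j < l.length := h.1
    have hd : l.drop j = l[j] :: l.drop (j+1) := List.drop_eq_getElem_cons hlt
    have hq : l[j] ≠ '"' := by
      intro hc
      exact h.2 (by rw [List.getElem?_eq_getElem hlt, hc])
    have hb : l[j] ≠ '\\' := by
      intro hc
      exact hbs (by rw [List.getElem?_eq_getElem hlt, hc])
    rw [hd, bStrLen_cons hq hb]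
    have := ih (by omega)
    omega
  | case3 j h =>
    intro hj
    by_cases hlt : j < l.length
    · have hq : l[j]? = some '"' := by
        by_contra hc
        exact h ⟨hlt, hc⟩
      have hd : l.drop j = l[j] :: l.drop (j+1) := List.drop_eq_getElem_cons hlt
      have : l[j] = '"' := by
        rw [List.getElem?_eq_getElem hlt] at hq; injection hq
      rw [hd, this]
      simp only [bStrLen]
      omega
    · have : l.drop j = [] := List.drop_eq_nil_of_le (by omega)
      rw [this]
      simp only [bStrLen]
      omega

theorem bLitLen_other {c : Char} {t : List Char} (hc1 : c ≠ '/') (hc2 : c ≠ '"') :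
    bLitLen (c :: t) = 0 := by
  rw [bLitLen.eq_def]
  split <;> simp_all

theorem bLitLen_slash {c : Char} {t : List Char} (h1 : c ≠ '/') (h2 : c ≠ '*') :
    bLitLen ('/' :: c :: t) = 0 := by
  rw [bLitLen.eq_def]
  split <;> simp_all

theorem bLitLen_bridge (l : List Char) (i : Nat) (hi : i ≤ l.length) :
    pvScanCS l i = if bLitLen (l.drop i) = 0 then none else some (i + bLitLen (l.drop i)) := by
  by_cases hlt : i < l.length
  · have hgi : l[i]? = some l[i] := List.getElem?_eq_getElem hlt
    have hd : l.drop i = l[i] :: l.drop (i+1) := List.drop_eq_getElem_cons hlt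
    by_cases hc : l[i] = '/'
    · by_cases h1 : l[i+1]? = some '/'
      · have h2 : i + 1 < l.length := (List.getElem?_eq_some_iff.mp h1).1
        have h3 : i + 2 ≤ l.length := by omega
        have hd2 : l.drop (i+1) = l[i+1] :: l.drop (i+2) := List.drop_eq_getElem_cons h2
        have h1' : l[i+1] = '/' := by
          rw [List.getElem?_eq_getElem h2] at h1; injection h1
        have hlen : (l.drop (i+2)).length = l.length - (i+2) := List.length_drop
        rw [pvScanCS.eq_def]
        rw [if_pos (show (l[i]? == some '/' && l[i+1]? == some '/') = true by simp [hgi, hc, h1])]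
        have hfi2 : (l.drop i).findIdx? (· == '\n') = ((l.drop (i+2)).findIdx? (· == '\n')).map (· + 2) := by
          rw [hd, hd2, hc, h1', List.findIdx?_cons, List.findIdx?_cons]
          simp only [show (('/' : Char) == '\n') = false from by decide, if_false, Option.map_map]
          cases (l.drop (i+2)).findIdx? (· == '\n') <;> simp
        rw [hfi2, hd, hd2, hc, h1']
        simp only [bLitLen]
        cases hfi : (l.drop (i+2)).findIdx? (· == '\n') with
        | none =>
          simp only [Option.map_none]
          rw [if_neg (by omega)]
          simp only [Option.some.injEq]
          omega
        | some d =>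
          simp only [Option.map_some]
          rw [if_neg (by omega)]
          simp only [Option.some.injEq]
          omega
      · by_cases h1b : l[i+1]? = some '*'
        · have h2 : i + 1 < l.length := (List.getElem?_eq_some_iff.mp h1b).1
          have h3 : i + 2 ≤ l.length := by omega
          have hd2 : l.drop (i+1) = l[i+1] :: l.drop (i+2) := List.drop_eq_getElem_cons h2
          have h1' : l[i+1] = '*' := by
            rw [List.getElem?_eq_getElem h2] at h1b; injection h1b
          have hlen : (l.drop (i+2)).length = l.length - (i+2) := List.length_drop
          rw [pvScanCS.eq_def]
          rw [if_neg (show ¬ (l[i]? == some '/' && l[i+1]? == some '/') = true by simp [h1b, h1'])]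
          rw [if_pos (show (l[i]? == some '/' && l[i+1]? == some '*') = true by simp [hgi, hc, h1b])]
          rw [hd, hd2, hc, h1']
          simp only [bLitLen, ← bStarPos_eq]
          cases hfi : bStarPos (l.drop (i+2)) with
          | none =>
            rw [if_neg (by simp)]
            simp only [Option.some.injEq]
            omega
          | some d =>
            rw [if_neg (by simp)]
            simp only [Option.some.injEq]
            omega
        · have hz : bLitLen (l.drop i) = 0 := by
            rw [hd, hc]
            by_cases h2 : i + 1 < l.length
            · have hd2 : l.drop (i+1) = l[i+1] :: l.drop (i+2) := List.drop_eq_getElem_cons h2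
              have hg2 : l[i+1]? = some l[i+1] := List.getElem?_eq_getElem h2
              rw [hd2]
              exact bLitLen_slash (fun hx => h1 (by rw [hg2, hx])) (fun hx => h1b (by rw [hg2, hx]))
            · have hd2 : l.drop (i+1) = [] := List.drop_eq_nil_of_le (by omega)
              rw [hd2, bLitLen.eq_def]
              split <;> simp_all
          rw [hz, if_pos rfl, pvScanCS.eq_def]
          rw [if_neg (by simp [h1]), if_neg (by simp [h1b]), if_neg (by simp [hgi, hc])]
    · by_cases hq : l[i] = '"'
      · rw [pvScanCS.eq_def]
        rw [if_neg (by simp [hgi, hq]), if_neg (by simp [hgi, hq]),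
            if_pos (show (l[i]? == some '"') = true by simp [hgi, hq])]
        rw [hd, hq]
        simp only [bLitLen]
        rw [if_neg (by omega)]
        rw [bStrLen_bridge l (i+1) (by omega)]
        simp only [Option.some.injEq]
        omega
      · have hz : bLitLen (l.drop i) = 0 := by
          rw [hd]
          exact bLitLen_other hc hq
        rw [hz, if_pos rfl, pvScanCS.eq_def]
        rw [if_neg (by simp [hgi, hc]), if_neg (by simp [hgi, hc]), if_neg (by simp [hgi, hq])]
  · have hd : l.drop i = [] := List.drop_eq_nil_of_le (by omega)
    have hnone : l[i]? = none := by
      simp only [List.getElem?_eq_none_iff]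
      omega
    rw [pvScanCS.eq_def, hd]
    simp [hnone, bLitLen]

theorem bWsLen_bridge (l : List Char) (i : Nat) :
    pvSkipWS l i = i + bWsLen (l.drop i) := by
  fun_induction pvSkipWS l i with
  | case1 i h hws ih =>
    have hd : l.drop i = l[i] :: l.drop (i+1) := List.drop_eq_getElem_cons h
    rw [hd]
    simp only [bWsLen]
    rw [show bWs l[i] = true from hws, if_pos rfl]
    omega
  | case2 i h hws =>
    have hd : l.drop i = l[i] :: l.drop (i+1) := List.drop_eq_getElem_cons h
    rw [hd]
    simp only [bWsLen]
    rw [show bWs l[i] = false from (by simpa using hws)]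
    simp
  | case3 i h =>
    have hd : l.drop i = [] := List.drop_eq_nil_of_le (by omega)
    rw [hd]
    simp [bWsLen]

theorem bTgtLen_word {c : Char} {t : List Char} (h : bWord c = true) :
    bTgtLen (c :: t) = 1 + bTgtLen t := by
  cases t <;> simp [bTgtLen, h]

theorem bTgtLen_bridge (l : List Char) (i : Nat) :
    pvSkipTarget l i = i + bTgtLen (l.drop i) := by
  fun_induction pvSkipTarget l i with
  | case1 i h hw ih =>
    have hd : l.drop i = l[i] :: l.drop (i+1) := List.drop_eq_getElem_cons h
    rw [hd, bTgtLen_word (show bWord l[i] = true from hw)]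
    omega
  | case2 i h hw hc ih =>
    have hc1 : l[i] = ':' := by
      have := (Bool.and_eq_true_iff.mp hc).1; simpa using this
    have hc2 : l[i+1]? = some ':' := by
      have := (Bool.and_eq_true_iff.mp hc).2; simpa using this
    have h2 : i + 1 < l.length := (List.getElem?_eq_some_iff.mp hc2).1
    have hd : l.drop i = l[i] :: l.drop (i+1) := List.drop_eq_getElem_cons h
    have hd2 : l.drop (i+1) = l[i+1] :: l.drop (i+2) := List.drop_eq_getElem_cons h2
    have hc2' : l[i+1] = ':' := by
      rw [List.getElem?_eq_getElem h2] at hc2; injection hc2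
    rw [hd, hd2, hc1, hc2']
    simp only [bTgtLen]
    rw [show bWord ':' = false from by decide]
    simp only [Bool.false_eq_true, if_false, beq_self_eq_true, Bool.and_self, if_pos]
    omega
  | case3 i h hw hc =>
    have hd : l.drop i = l[i] :: l.drop (i+1) := List.drop_eq_getElem_cons h
    have hw' : bWord l[i] = false := by simpa using hw
    rw [hd]
    by_cases h2 : i + 1 < l.length
    · have hd2 : l.drop (i+1) = l[i+1] :: l.drop (i+2) := List.drop_eq_getElem_cons h2
      rw [hd2]
      simp only [bTgtLen, hw']
      have hc' : (l[i] == ':' && l[i+1] == ':') = false := by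
        have := List.getElem?_eq_getElem h2
        by_contra hx
        simp only [Bool.not_eq_false, Bool.and_eq_true, beq_iff_eq] at hx
        apply hc
        simp [hx.1, this, hx.2]
      simp [hc']
    · have hd2 : l.drop (i+1) = [] := List.drop_eq_nil_of_le (by omega)
      rw [hd2]
      simp [bTgtLen, hw']
  | case4 i h =>
    have hd : l.drop i = [] := List.drop_eq_nil_of_le (by omega)
    rw [hd]
    simp [bTgtLen]

theorem bWsLen_le (s : List Char) : bWsLen s ≤ s.length := by
  induction s with
  | nil => simp [bWsLen]
  | cons c t ih =>
    simp only [bWsLen, List.length_cons]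
    split <;> omega

theorem bTgtLen_le (s : List Char) : bTgtLen s ≤ s.length := by
  fun_induction bTgtLen s <;> simp_all <;> omega

theorem bStarPos_le {t : List Char} {d : Nat} (h : bStarPos t = some d) : d + 2 ≤ t.length := by
  induction t generalizing d with
  | nil => simp [bStarPos] at h
  | cons a rest ih =>
    rw [bStarPos.eq_def] at h
    split at h
    · rename_i x heq
      injection heq with h1 h2
      subst h1 h2
      injection h with h'
      subst h'
      simp
    · rename_i c t hne heq
      injection heq with h1 h2
      subst h1 h2
      simp only [Option.map_eq_some_iff] at h
      obtain ⟨d', hd', rfl⟩ := h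
      have := ih hd'
      simp only [List.length_cons]
      omega
    · simp at h

theorem bStrLen_le (s : List Char) : bStrLen s ≤ s.length := by
  fun_induction bStrLen s <;> simp_all <;> omega

theorem bLitLen_le (s : List Char) : bLitLen s ≤ s.length := by
  rw [bLitLen.eq_def]
  split
  · rename_i t
    split
    · simp
    · rename_i d h
      have := List.findIdx?_eq_some_iff_findIdx_eq.mp h
      simp only [List.length_cons]
      omega
  · rename_i t
    split
    · simp
    · rename_i d h
      have := bStarPos_le h
      simp only [List.length_cons]
      omega
  · rename_i t
    have := bStrLen_le t
    simp only [List.length_cons]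
    omega
  · simp

theorem bMb_lit {s : List Char} {d : Int} (h : 0 < bLitLen s) :
    bMb s d = (bMb (s.drop (bLitLen s)) d).map (· + bLitLen s) := by
  cases s with
  | nil => simp [bLitLen] at h
  | cons c t => rw [bMb.eq_def]; simp only [dif_pos h]

theorem bMb_cons {c : Char} {t : List Char} {d : Int} (h0 : bLitLen (c :: t) = 0) :
    bMb (c :: t) d =
      if c == '{' then (bMb t (d + 1)).map (· + 1)
      else if c == '}' then
        (if d - 1 == 0 then some 0 else (bMb t (d - 1)).map (· + 1))
      else (bMb t d).map (· + 1) := by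
  rw [bMb.eq_def]
  simp only [dif_neg (by omega : ¬ 0 < bLitLen (c :: t))]

theorem bMb_bridge (l : List Char) (i : Nat) (d : Int) :
    i ≤ l.length → pvFindMB l i d = (bMb (l.drop i) d).map (· + i) := by
  fun_induction pvFindMB l i d with
  | case1 i d hn e hscan ih =>
    intro hi
    have hb := bLitLen_bridge l i hi
    rw [hscan] at hb
    have hk : bLitLen (l.drop i) ≠ 0 := by
      intro h0; rw [h0] at hb; simp at hb
    have he : e = i + bLitLen (l.drop i) := by
      rw [if_neg hk] at hb; injection hb
    have hdd : (l.drop i).drop (bLitLen (l.drop i)) = l.drop e := by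
      rw [List.drop_drop]; congr 1; omega
    have hle : e ≤ l.length := by
      have := bLitLen_le (l.drop i)
      have hl2 : (l.drop i).length = l.length - i := List.length_drop
      omega
    rw [bMb_lit (s := l.drop i) (by omega), hdd, ih hle, Option.map_map]
    congr 1
    funext x
    simp only [Function.comp]
    omega
  | case2 i d hn hscan hbr ih =>
    intro hi
    have hb := bLitLen_bridge l i hi
    rw [hscan] at hb
    have hk : bLitLen (l.drop i) = 0 := by
      by_contra h0; rw [if_neg h0] at hb; simp at hb
    have hd : l.drop i = l[i] :: l.drop (i+1) := List.drop_eq_getElem_cons hn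
    rw [hd] at hk
    rw [hd, bMb_cons hk, if_pos hbr, ih (by omega), Option.map_map]
    congr 1
    funext x
    simp only [Function.comp]
    omega
  | case3 i d hn hscan hbr hbr2 hz =>
    intro hi
    have hb := bLitLen_bridge l i hi
    rw [hscan] at hb
    have hk : bLitLen (l.drop i) = 0 := by
      by_contra h0; rw [if_neg h0] at hb; simp at hb
    have hd : l.drop i = l[i] :: l.drop (i+1) := List.drop_eq_getElem_cons hn
    rw [hd] at hk
    rw [hd, bMb_cons hk, if_neg (by simpa using hbr), if_pos hbr2, if_pos hz]
    simp
  | case4 i d hn hscan hbr hbr2 hz ih =>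
    intro hi
    have hb := bLitLen_bridge l i hi
    rw [hscan] at hb
    have hk : bLitLen (l.drop i) = 0 := by
      by_contra h0; rw [if_neg h0] at hb; simp at hb
    have hd : l.drop i = l[i] :: l.drop (i+1) := List.drop_eq_getElem_cons hn
    rw [hd] at hk
    rw [hd, bMb_cons hk, if_neg (by simpa using hbr), if_pos hbr2, if_neg (by simpa using hz),
        ih (by omega), Option.map_map]
    congr 1
    funext x
    simp only [Function.comp]
    omega
  | case5 i d hn hscan hbr hbr2 ih =>
    intro hi
    have hb := bLitLen_bridge l i hi
    rw [hscan] at hb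
    have hk : bLitLen (l.drop i) = 0 := by
      by_contra h0; rw [if_neg h0] at hb; simp at hb
    have hd : l.drop i = l[i] :: l.drop (i+1) := List.drop_eq_getElem_cons hn
    rw [hd] at hk
    rw [hd, bMb_cons hk, if_neg (by simpa using hbr), if_neg (by simpa using hbr2),
        ih (by omega), Option.map_map]
    congr 1
    funext x
    simp only [Function.comp]
    omega
  | case6 i d hn =>
    intro hi
    have hd : l.drop i = [] := List.drop_eq_nil_of_le (by omega)
    rw [hd]
    simp [bMb]

theorem pvFindMB_lt' (l : List Char) (i : Nat) (d : Int) :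
    ∀ e, pvFindMB l i d = some e → e < l.length := by
  fun_induction pvFindMB l i d with
  | case1 i d hn e2 hscan ih => exact ih
  | case2 i d hn hscan hbr ih => exact ih
  | case3 i d hn hscan hbr hbr2 hz =>
    intro e h; injection h with h'; omega
  | case4 i d hn hscan hbr hbr2 hz ih => exact ih
  | case5 i d hn hscan hbr hbr2 ih => exact ih
  | case6 i d hn => intro e h; simp at h

theorem pvFindMB_lt {l : List Char} {i e : Nat} {d : Int} (h : pvFindMB l i d = some e) :
    e < l.length := pvFindMB_lt' l i d e h

theorem bWithAt_bridge (l : List Char) (j : Nat) :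
    pvWithCond l j = bWithAt (l.drop j) := by
  unfold pvWithCond bWithAt
  simp only [List.getElem?_drop, Nat.add_zero]
  cases l[j+4]? <;> rfl

theorem bDoHere_eq (l : List Char) (i : Nat) (prev : Option Char)
    (hp : i = 0 ∧ prev = none ∨ 1 ≤ i ∧ prev = l[i-1]?) :
    pvDoCond l i = bDoHere prev (l.drop i) := by
  unfold pvDoCond bDoHere
  simp only [List.getElem?_drop, Nat.add_zero]
  rcases hp with ⟨rfl, rfl⟩ | ⟨h1, rfl⟩
  · simp [pvIsWord, bWord]
  · have h0 : (i == 0) = false := by simp; omega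
    rw [h0]
    cases hq : l[i-1]? <;> simp [pvIsWord, bWord]

theorem pvDoCond_lt {l : List Char} {i : Nat} (hdo : pvDoCond l i = true) : i + 2 < l.length := by
  unfold pvDoCond at hdo
  simp only [Bool.and_eq_true] at hdo
  have h4 := hdo.2
  cases hq : l[i+2]? with
  | none => rw [hq] at h4; simp at h4
  | some c => exact (List.getElem?_eq_some_iff.mp hq).1

theorem dropdrop (l : List Char) (m k : Nat) : (l.drop m).drop k = l.drop (m + k) :=
  List.drop_drop

theorem bScan_bridge (l : List Char) (i : Nat) :
    ∀ prev, (i = 0 ∧ prev = none ∨ 1 ≤ i ∧ prev = l[i-1]?) → i ≤ l.length →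
      bScan prev i (l.drop i) = pvScanB l i := by
  fun_induction pvScanB l i with
  | case1 i hn e hscan ih =>
    intro prev hp hi
    have hb := bLitLen_bridge l i hi
    rw [hscan] at hb
    have hk0 : bLitLen (l.drop i) ≠ 0 := by
      intro h0; rw [h0] at hb; simp at hb
    have he : e = i + bLitLen (l.drop i) := by
      rw [if_neg hk0] at hb; injection hb
    have hll : (l.drop i).length = l.length - i := List.length_drop
    have hne : l.drop i ≠ [] := by
      intro h0; rw [h0] at hll; simp at hll; omega
    have hle : e ≤ l.length := by
      have := bLitLen_le (l.drop i); omega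
    rw [bScan.eq_def, dif_neg hne, dif_pos (by omega : 0 < bLitLen (l.drop i))]
    rw [dropdrop, List.getElem?_drop]
    rw [show i + (bLitLen (l.drop i) - 1) = e - 1 from by omega,
        show i + bLitLen (l.drop i) = e from he.symm]
    exact ih l[e-1]? (Or.inr ⟨by omega, rfl⟩) hle
  | case6 i hn hscan hdo ih =>
    intro prev hp hi
    have hb := bLitLen_bridge l i hi
    rw [hscan] at hb
    have hk0 : bLitLen (l.drop i) = 0 := by
      by_contra h0; rw [if_neg h0] at hb; simp at hb
    have hll : (l.drop i).length = l.length - i := List.length_drop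
    have hne : l.drop i ≠ [] := by
      intro h0; rw [h0] at hll; simp at hll; omega
    have hdo' : bDoHere prev (l.drop i) = false := by
      rw [← bDoHere_eq l i prev hp]; simpa using hdo
    rw [bScan.eq_def, dif_neg hne, dif_neg (by omega : ¬ 0 < bLitLen (l.drop i)),
        if_neg (by simp [hdo'])]
    rw [dropdrop, List.getElem?_drop, Nat.add_zero]
    exact ih l[i]? (Or.inr ⟨by omega, by simp⟩) (by omega)
  | case7 i hn =>
    intro prev hp hi
    rw [List.drop_eq_nil_of_le (by omega : l.length ≤ i), bScan.eq_def]
    simp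
  | case2 i hn hscan hdo hw hbr eb hmb ih =>
    intro prev hp hi
    have hb := bLitLen_bridge l i hi
    rw [hscan] at hb
    have hk0 : bLitLen (l.drop i) = 0 := by
      by_contra h0; rw [if_neg h0] at hb; simp at hb
    have hll : (l.drop i).length = l.length - i := List.length_drop
    have hne : l.drop i ≠ [] := by
      intro h0; rw [h0] at hll; simp at hll; omega
    have hdo' : bDoHere prev (l.drop i) = true := by
      rw [← bDoHere_eq l i prev hp]; exact hdo
    have hdo2 : i + 2 < l.length := pvDoCond_lt hdo
    rw [bScan.eq_def, dif_neg hne, dif_neg (by omega : ¬ 0 < bLitLen (l.drop i)),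
        if_pos hdo']
    simp only [dropdrop, List.getElem?_drop, List.head?_drop]
    have h1 := bWsLen_bridge l (i+2)
    rw [show i + (2 + bWsLen (l.drop (i+2))) = pvSkipWS l (i+2) from by omega]
    have h2 := bTgtLen_bridge l (pvSkipWS l (i+2))
    rw [show i + (2 + bWsLen (l.drop (i+2)) + bTgtLen (l.drop (pvSkipWS l (i+2))))
          = pvSkipTarget l (pvSkipWS l (i+2)) from by omega]
    rw [show i + (2 + bWsLen (l.drop (i+2)) + bTgtLen (l.drop (pvSkipWS l (i+2))) - 1)
          = pvSkipTarget l (pvSkipWS l (i+2)) - 1 from by omega]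
    have h3 := bWsLen_bridge l (pvSkipTarget l (pvSkipWS l (i+2)))
    rw [show i + (2 + bWsLen (l.drop (i+2)) + bTgtLen (l.drop (pvSkipWS l (i+2)))
            + bWsLen (l.drop (pvSkipTarget l (pvSkipWS l (i+2)))))
          = pvSkipWS l (pvSkipTarget l (pvSkipWS l (i+2))) from by omega]
    rw [bWithAt_bridge] at hw
    rw [if_pos hw]
    rw [show i + (2 + bWsLen (l.drop (i+2)) + bTgtLen (l.drop (pvSkipWS l (i+2)))
            + bWsLen (l.drop (pvSkipTarget l (pvSkipWS l (i+2)))) + 4)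
          = pvSkipWS l (pvSkipTarget l (pvSkipWS l (i+2))) + 4 from by omega]
    have h4 := bWsLen_bridge l (pvSkipWS l (pvSkipTarget l (pvSkipWS l (i+2))) + 4)
    rw [show i + (2 + bWsLen (l.drop (i+2)) + bTgtLen (l.drop (pvSkipWS l (i+2)))
            + bWsLen (l.drop (pvSkipTarget l (pvSkipWS l (i+2)))) + 4
            + bWsLen (l.drop (pvSkipWS l (pvSkipTarget l (pvSkipWS l (i+2))) + 4)))
          = pvSkipWS l (pvSkipWS l (pvSkipTarget l (pvSkipWS l (i+2))) + 4) from by omega]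
    have hA_le : bWsLen (l.drop (i+2)) ≤ l.length - (i+2) := by
      have := bWsLen_le (l.drop (i+2))
      have h0 : (l.drop (i+2)).length = l.length - (i+2) := List.length_drop
      omega
    have hB_le : bTgtLen (l.drop (pvSkipWS l (i+2))) ≤ l.length - pvSkipWS l (i+2) := by
      have := bTgtLen_le (l.drop (pvSkipWS l (i+2)))
      have h0 : (l.drop (pvSkipWS l (i+2))).length = l.length - pvSkipWS l (i+2) := List.length_drop
      omega
    rw [if_pos hbr]
    have hK : pvSkipWS l (pvSkipWS l (pvSkipTarget l (pvSkipWS l (i+2))) + 4) < l.length :=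
      (List.getElem?_eq_some_iff.mp (by simpa using hbr)).1
    have hbrid := bMb_bridge l (pvSkipWS l (pvSkipWS l (pvSkipTarget l (pvSkipWS l (i+2))) + 4)) 0
      (by omega)
    rw [hmb] at hbrid
    have heb1 : eb + 1 ≤ l.length := pvFindMB_lt hmb
    cases hx : bMb (l.drop (pvSkipWS l (pvSkipWS l (pvSkipTarget l (pvSkipWS l (i+2))) + 4))) 0 with
    | none => rw [hx] at hbrid; simp at hbrid
    | some r =>
      rw [hx] at hbrid
      simp only [Option.map_some, Option.some.injEq] at hbrid
      simp only []
      rw [show i + (2 + bWsLen (l.drop (i+2)) + bTgtLen (l.drop (pvSkipWS l (i+2)))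
              + bWsLen (l.drop (pvSkipTarget l (pvSkipWS l (i+2)))) + 4
              + bWsLen (l.drop (pvSkipWS l (pvSkipTarget l (pvSkipWS l (i+2))) + 4)) + r)
            = eb from by omega]
      rw [show i + (2 + bWsLen (l.drop (i+2)) + bTgtLen (l.drop (pvSkipWS l (i+2)))
              + bWsLen (l.drop (pvSkipTarget l (pvSkipWS l (i+2)))) + 4
              + bWsLen (l.drop (pvSkipWS l (pvSkipTarget l (pvSkipWS l (i+2))) + 4)) + r + 1)
            = eb + 1 from by omega]
      rw [show pvSkipWS l (pvSkipWS l (pvSkipTarget l (pvSkipWS l (i+2))) + 4) + r + 1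
            = eb + 1 from by omega]
      rw [ih l[eb]? (Or.inr ⟨by omega, by simp⟩) heb1]
  | case3 i hn hscan hdo hw hbr hmb ih =>
    intro prev hp hi
    have hb := bLitLen_bridge l i hi
    rw [hscan] at hb
    have hk0 : bLitLen (l.drop i) = 0 := by
      by_contra h0; rw [if_neg h0] at hb; simp at hb
    have hll : (l.drop i).length = l.length - i := List.length_drop
    have hne : l.drop i ≠ [] := by
      intro h0; rw [h0] at hll; simp at hll; omega
    have hdo' : bDoHere prev (l.drop i) = true := by
      rw [← bDoHere_eq l i prev hp]; exact hdo
    have hdo2 : i + 2 < l.length := pvDoCond_lt hdo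
    rw [bScan.eq_def, dif_neg hne, dif_neg (by omega : ¬ 0 < bLitLen (l.drop i)),
        if_pos hdo']
    simp only [dropdrop, List.getElem?_drop, List.head?_drop]
    have h1 := bWsLen_bridge l (i+2)
    rw [show i + (2 + bWsLen (l.drop (i+2))) = pvSkipWS l (i+2) from by omega]
    have h2 := bTgtLen_bridge l (pvSkipWS l (i+2))
    rw [show i + (2 + bWsLen (l.drop (i+2)) + bTgtLen (l.drop (pvSkipWS l (i+2))))
          = pvSkipTarget l (pvSkipWS l (i+2)) from by omega]
    rw [show i + (2 + bWsLen (l.drop (i+2)) + bTgtLen (l.drop (pvSkipWS l (i+2))) - 1)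
          = pvSkipTarget l (pvSkipWS l (i+2)) - 1 from by omega]
    have h3 := bWsLen_bridge l (pvSkipTarget l (pvSkipWS l (i+2)))
    rw [show i + (2 + bWsLen (l.drop (i+2)) + bTgtLen (l.drop (pvSkipWS l (i+2)))
            + bWsLen (l.drop (pvSkipTarget l (pvSkipWS l (i+2)))))
          = pvSkipWS l (pvSkipTarget l (pvSkipWS l (i+2))) from by omega]
    rw [bWithAt_bridge] at hw
    rw [if_pos hw]
    rw [show i + (2 + bWsLen (l.drop (i+2)) + bTgtLen (l.drop (pvSkipWS l (i+2)))
            + bWsLen (l.drop (pvSkipTarget l (pvSkipWS l (i+2)))) + 4)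
          = pvSkipWS l (pvSkipTarget l (pvSkipWS l (i+2))) + 4 from by omega]
    have h4 := bWsLen_bridge l (pvSkipWS l (pvSkipTarget l (pvSkipWS l (i+2))) + 4)
    rw [show i + (2 + bWsLen (l.drop (i+2)) + bTgtLen (l.drop (pvSkipWS l (i+2)))
            + bWsLen (l.drop (pvSkipTarget l (pvSkipWS l (i+2)))) + 4
            + bWsLen (l.drop (pvSkipWS l (pvSkipTarget l (pvSkipWS l (i+2))) + 4)))
          = pvSkipWS l (pvSkipWS l (pvSkipTarget l (pvSkipWS l (i+2))) + 4) from by omega]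
    have hA_le : bWsLen (l.drop (i+2)) ≤ l.length - (i+2) := by
      have := bWsLen_le (l.drop (i+2))
      have h0 : (l.drop (i+2)).length = l.length - (i+2) := List.length_drop
      omega
    have hB_le : bTgtLen (l.drop (pvSkipWS l (i+2))) ≤ l.length - pvSkipWS l (i+2) := by
      have := bTgtLen_le (l.drop (pvSkipWS l (i+2)))
      have h0 : (l.drop (pvSkipWS l (i+2))).length = l.length - pvSkipWS l (i+2) := List.length_drop
      omega
    rw [if_pos hbr]
    have hK : pvSkipWS l (pvSkipWS l (pvSkipTarget l (pvSkipWS l (i+2))) + 4) < l.length :=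
      (List.getElem?_eq_some_iff.mp (by simpa using hbr)).1
    have hbrid := bMb_bridge l (pvSkipWS l (pvSkipWS l (pvSkipTarget l (pvSkipWS l (i+2))) + 4)) 0
      (by omega)
    rw [hmb] at hbrid
    have hbmb : bMb (l.drop (pvSkipWS l (pvSkipWS l (pvSkipTarget l (pvSkipWS l (i+2))) + 4))) 0 = none := by
      cases hx : bMb (l.drop (pvSkipWS l (pvSkipWS l (pvSkipTarget l (pvSkipWS l (i+2))) + 4))) 0 with
      | none => rfl
      | some r => rw [hx] at hbrid; simp at hbrid
    rw [hbmb]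
    exact ih l[pvSkipTarget l (pvSkipWS l (i+2)) - 1]? (Or.inr ⟨by omega, rfl⟩) (by omega)
  | case4 i hn hscan hdo hw hbr ih =>
    intro prev hp hi
    have hb := bLitLen_bridge l i hi
    rw [hscan] at hb
    have hk0 : bLitLen (l.drop i) = 0 := by
      by_contra h0; rw [if_neg h0] at hb; simp at hb
    have hll : (l.drop i).length = l.length - i := List.length_drop
    have hne : l.drop i ≠ [] := by
      intro h0; rw [h0] at hll; simp at hll; omega
    have hdo' : bDoHere prev (l.drop i) = true := by
      rw [← bDoHere_eq l i prev hp]; exact hdo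
    have hdo2 : i + 2 < l.length := pvDoCond_lt hdo
    rw [bScan.eq_def, dif_neg hne, dif_neg (by omega : ¬ 0 < bLitLen (l.drop i)),
        if_pos hdo']
    simp only [dropdrop, List.getElem?_drop, List.head?_drop]
    have h1 := bWsLen_bridge l (i+2)
    rw [show i + (2 + bWsLen (l.drop (i+2))) = pvSkipWS l (i+2) from by omega]
    have h2 := bTgtLen_bridge l (pvSkipWS l (i+2))
    rw [show i + (2 + bWsLen (l.drop (i+2)) + bTgtLen (l.drop (pvSkipWS l (i+2))))
          = pvSkipTarget l (pvSkipWS l (i+2)) from by omega]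
    rw [show i + (2 + bWsLen (l.drop (i+2)) + bTgtLen (l.drop (pvSkipWS l (i+2))) - 1)
          = pvSkipTarget l (pvSkipWS l (i+2)) - 1 from by omega]
    have h3 := bWsLen_bridge l (pvSkipTarget l (pvSkipWS l (i+2)))
    rw [show i + (2 + bWsLen (l.drop (i+2)) + bTgtLen (l.drop (pvSkipWS l (i+2)))
            + bWsLen (l.drop (pvSkipTarget l (pvSkipWS l (i+2)))))
          = pvSkipWS l (pvSkipTarget l (pvSkipWS l (i+2))) from by omega]
    rw [bWithAt_bridge] at hw
    rw [if_pos hw]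
    rw [show i + (2 + bWsLen (l.drop (i+2)) + bTgtLen (l.drop (pvSkipWS l (i+2)))
            + bWsLen (l.drop (pvSkipTarget l (pvSkipWS l (i+2)))) + 4)
          = pvSkipWS l (pvSkipTarget l (pvSkipWS l (i+2))) + 4 from by omega]
    have h4 := bWsLen_bridge l (pvSkipWS l (pvSkipTarget l (pvSkipWS l (i+2))) + 4)
    rw [show i + (2 + bWsLen (l.drop (i+2)) + bTgtLen (l.drop (pvSkipWS l (i+2)))
            + bWsLen (l.drop (pvSkipTarget l (pvSkipWS l (i+2)))) + 4
            + bWsLen (l.drop (pvSkipWS l (pvSkipTarget l (pvSkipWS l (i+2))) + 4)))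
          = pvSkipWS l (pvSkipWS l (pvSkipTarget l (pvSkipWS l (i+2))) + 4) from by omega]
    have hA_le : bWsLen (l.drop (i+2)) ≤ l.length - (i+2) := by
      have := bWsLen_le (l.drop (i+2))
      have h0 : (l.drop (i+2)).length = l.length - (i+2) := List.length_drop
      omega
    have hB_le : bTgtLen (l.drop (pvSkipWS l (i+2))) ≤ l.length - pvSkipWS l (i+2) := by
      have := bTgtLen_le (l.drop (pvSkipWS l (i+2)))
      have h0 : (l.drop (pvSkipWS l (i+2))).length = l.length - pvSkipWS l (i+2) := List.length_drop
      omega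
    rw [if_neg hbr]
    exact ih l[pvSkipTarget l (pvSkipWS l (i+2)) - 1]? (Or.inr ⟨by omega, rfl⟩) (by omega)
  | case5 i hn hscan hdo hw ih =>
    intro prev hp hi
    have hb := bLitLen_bridge l i hi
    rw [hscan] at hb
    have hk0 : bLitLen (l.drop i) = 0 := by
      by_contra h0; rw [if_neg h0] at hb; simp at hb
    have hll : (l.drop i).length = l.length - i := List.length_drop
    have hne : l.drop i ≠ [] := by
      intro h0; rw [h0] at hll; simp at hll; omega
    have hdo' : bDoHere prev (l.drop i) = true := by
      rw [← bDoHere_eq l i prev hp]; exact hdo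
    have hdo2 : i + 2 < l.length := pvDoCond_lt hdo
    rw [bScan.eq_def, dif_neg hne, dif_neg (by omega : ¬ 0 < bLitLen (l.drop i)),
        if_pos hdo']
    simp only [dropdrop, List.getElem?_drop, List.head?_drop]
    have h1 := bWsLen_bridge l (i+2)
    rw [show i + (2 + bWsLen (l.drop (i+2))) = pvSkipWS l (i+2) from by omega]
    have h2 := bTgtLen_bridge l (pvSkipWS l (i+2))
    rw [show i + (2 + bWsLen (l.drop (i+2)) + bTgtLen (l.drop (pvSkipWS l (i+2))))
          = pvSkipTarget l (pvSkipWS l (i+2)) from by omega]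
    rw [show i + (2 + bWsLen (l.drop (i+2)) + bTgtLen (l.drop (pvSkipWS l (i+2))) - 1)
          = pvSkipTarget l (pvSkipWS l (i+2)) - 1 from by omega]
    have h3 := bWsLen_bridge l (pvSkipTarget l (pvSkipWS l (i+2)))
    rw [show i + (2 + bWsLen (l.drop (i+2)) + bTgtLen (l.drop (pvSkipWS l (i+2)))
            + bWsLen (l.drop (pvSkipTarget l (pvSkipWS l (i+2)))))
          = pvSkipWS l (pvSkipTarget l (pvSkipWS l (i+2))) from by omega]
    rw [bWithAt_bridge] at hw
    rw [if_neg (by simpa using hw)]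
    have hA_le : bWsLen (l.drop (i+2)) ≤ l.length - (i+2) := by
      have := bWsLen_le (l.drop (i+2))
      have h0 : (l.drop (i+2)).length = l.length - (i+2) := List.length_drop
      omega
    have hB_le : bTgtLen (l.drop (pvSkipWS l (i+2))) ≤ l.length - pvSkipWS l (i+2) := by
      have := bTgtLen_le (l.drop (pvSkipWS l (i+2)))
      have h0 : (l.drop (pvSkipWS l (i+2))).length = l.length - pvSkipWS l (i+2) := List.length_drop
      omega
    exact ih l[pvSkipTarget l (pvSkipWS l (i+2)) - 1]? (Or.inr ⟨by omega, rfl⟩) (by omega)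


-- ===== VERDICT (by name: the statement is the Claim_ definition above) =====
theorem strip_activity_with_constraints_py_spec : Claim_equal_strip_activity_with_constraints_py := by
  intro text _
  unfold Spec_strip_activity_with_constraints_py strip_activity_with_constraints_py strip_activity_with_constraints_py_alt
  rw [pvLoopA_eq_render]
  rw [bRender_eq_pvRender]
  have h := bScan_bridge text.toList 0 none (Or.inl ⟨rfl, rfl⟩) (Nat.zero_le _)
  rw [List.drop_zero] at h
  rw [h]
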